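-- pv_equiv track=rewrite | github.com/ShannonBrayNC/linkedin-integration | linkedin_intros.py | looks_like_login_wall
-- ===== SOURCE A (Python) =====
-- def looks_like_login_wall(html_text: str) -> bool:
--     """
--     Heuristic: LinkedIn often shows 'Sign in' or 'Join LinkedIn' pages.
--     """
--     s = html_text.lower()
--     needles = [
--         "join linkedin",
--         "sign in",
--         "signin",
--         "authwall",
--         "login",
--         "challenge",
--         "security verification",
--     ]
--     return any(n in s for n in needles)
-- ===== SOURCE B (Python) =====
-- _NEEDLES = (
--     "join linkedin",
--     "sign in",
--     "signin",
--     "authwall",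
--     "login",
--     "challenge",
--     "security verification",
-- )
--
-- # Dispatch table built once: first character -> needles starting with it.
-- _BY_FIRST = {}
-- for _n in _NEEDLES:
--     _BY_FIRST.setdefault(_n[0], []).append(_n)
--
--
-- def looks_like_login_wall(html_text: str) -> bool:
--     """Single left-to-right scan; at each position only the needles whose
--     first character matches (via the dispatch table) are tried."""
--     s = html_text.lower()
--     for i in range(len(s)):
--         for n in _BY_FIRST.get(s[i], ()):
--             if s.startswith(n, i):
--                 return True
--     return False
-- ===== Notes on version B (the rewrite author's own statement) =====
-- stated objective: alternative
-- what changed: Replaced seven independent substring scans (any(n in s)) with one hand-written left-to-right scan over the lowercased text that, at each position, consults a first-character dispatch table built once and tries only the needles starting with that character.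
import Mathlib
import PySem

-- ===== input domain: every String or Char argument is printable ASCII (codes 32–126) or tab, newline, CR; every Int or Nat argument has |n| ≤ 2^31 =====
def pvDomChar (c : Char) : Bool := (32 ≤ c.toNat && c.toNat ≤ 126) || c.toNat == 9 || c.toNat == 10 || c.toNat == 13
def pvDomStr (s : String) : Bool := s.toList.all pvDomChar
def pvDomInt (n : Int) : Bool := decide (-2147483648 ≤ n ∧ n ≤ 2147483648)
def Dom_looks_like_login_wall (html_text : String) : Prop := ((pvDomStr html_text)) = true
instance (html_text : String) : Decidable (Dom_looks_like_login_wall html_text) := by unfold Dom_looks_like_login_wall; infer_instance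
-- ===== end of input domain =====

-- B replaces A's seven independent substring scans by one hand-written left-to-right scan
-- with a first-character dispatch table; objective: alternative algorithm, same result.

-- ===== PORT A =====
def pvNeedles : List String :=
  ["join linkedin", "sign in", "signin", "authwall", "login", "challenge",
   "security verification"]

def looks_like_login_wall (html_text : String) : Bool :=
  let s := PySem.Str.lower html_text
  pvNeedles.any (fun n => PySem.Str.isIn n s)

-- ===== PORT B =====
-- Source B builds, once, a dict from first character to the needles starting with it;
-- pvByFirst is that lookup (grouping by first character, needle order preserved).
def pvByFirst (c : Char) : List String :=
  pvNeedles.filter (fun n => n.toList.head? == some c)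

-- Source B's loop: at each position try only the dispatched needles with startswith.
def pvScan : List Char → Bool
  | [] => false
  | c :: rest =>
      (pvByFirst c).any (fun n => n.toList.isPrefixOf (c :: rest)) || pvScan rest

def looks_like_login_wall_alt (html_text : String) : Bool :=
  pvScan (PySem.Chars.lower html_text.toList)

-- ===== PRECONDITION & SPEC =====
def Spec_looks_like_login_wall (html_text : String) (out : Bool) : Prop := out = looks_like_login_wall_alt html_text
instance (html_text : String) (out : Bool) : Decidable (Spec_looks_like_login_wall html_text out) := by unfold Spec_looks_like_login_wall; infer_instance

-- ===== CLAIM (what is proved, stated in full; the proofs are below) =====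
def Claim_equal_looks_like_login_wall : Prop := ∀ (html_text : String), Dom_looks_like_login_wall html_text → Spec_looks_like_login_wall html_text (looks_like_login_wall html_text)

-- ===== LEMMAS AND PROOFS =====

-- every needle is nonempty, so a needle that is a prefix of c :: rest starts with c
lemma pvNeedles_head (n : String) (hn : n ∈ pvNeedles) (c : Char) (rest : List Char)
    (hp : n.toList.isPrefixOf (c :: rest) = true) : n.toList.head? = some c := by
  have hne : n.toList ≠ [] := by fin_cases hn <;> decide
  rcases List.exists_cons_of_ne_nil hne with ⟨d, t, hd⟩
  rw [hd] at hp ⊢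
  have := List.isPrefixOf_iff_prefix.mp hp
  rcases this with ⟨u, hu⟩
  simp only [List.cons_append, List.cons.injEq] at hu
  simp [hu.1]

lemma pvScan_iff (cs : List Char) :
    pvScan cs = true ↔ ∃ n ∈ pvNeedles, n.toList <:+: cs := by
  induction cs with
  | nil =>
      simp only [pvScan, List.infix_nil]
      constructor
      · intro h; exact absurd h (by decide)
      · rintro ⟨n, hn, hnil⟩
        exfalso; revert hnil; fin_cases hn <;> decide
  | cons c rest ih =>
      simp only [pvScan, Bool.or_eq_true, List.any_eq_true, ih]
      constructor
      · rintro (⟨n, hn, hp⟩ | ⟨n, hn, hi⟩)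
        · have hn' : n ∈ pvNeedles := List.mem_of_mem_filter hn
          exact ⟨n, hn', (List.isPrefixOf_iff_prefix.mp hp).isInfix⟩
        · exact ⟨n, hn, List.infix_cons_iff.mpr (Or.inr hi)⟩
      · rintro ⟨n, hn, hi⟩
        rcases List.infix_cons_iff.mp hi with hp | hi'
        · left
          refine ⟨n, ?_, List.isPrefixOf_iff_prefix.mpr hp⟩
          have hh := pvNeedles_head n hn c rest (List.isPrefixOf_iff_prefix.mpr hp)
          simp [pvByFirst, List.mem_filter, hn, hh]
        · exact Or.inr ⟨n, hn, hi'⟩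

-- ===== VERDICT (by name: the statement is the Claim_ definition above) =====
theorem looks_like_login_wall_spec : Claim_equal_looks_like_login_wall := by
  intro h _
  show looks_like_login_wall h = looks_like_login_wall_alt h
  rw [Bool.eq_iff_iff]
  simp only [looks_like_login_wall, looks_like_login_wall_alt, List.any_eq_true,
    PySem.Str.isIn_iff_infix, pvScan_iff, PySem.Str.toList_lower]
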